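-- pv_equiv track=rewrite | github.com/cmc3bear/danger-rose-benji-oli-adventures | tests/test_traffic_passing_oqe_validation.py | _generate_integration_test_recommendations
-- ===== SOURCE A (Python) =====
-- from typing import List, Dict, Any
--
-- def _generate_integration_test_recommendations(missing_tests: List[str],
--                                              required_tests: Dict[str, str]) -> List[Dict[str, str]]:
--     """Generate specific recommendations for missing integration tests"""
--     recommendations = []
--
--     for test_name in missing_tests:
--         description = required_tests[test_name]
--
--         if test_name == "multi_car_coordination":
--             recommendations.append({
--                 "test_name": test_name,
--                 "description": description,
--                 "implementation": "Create test with 5+ cars coordinating lane changes",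
--                 "expected_behavior": "Cars should communicate and avoid conflicts"
--             })
--         elif test_name == "emergency_evasion_scenarios":
--             recommendations.append({
--                 "test_name": test_name,
--                 "description": description,
--                 "implementation": "Create scenarios with sudden obstacles",
--                 "expected_behavior": "95%+ success rate in avoiding collisions"
--             })
--         elif test_name == "edge_case_scenarios":
--             recommendations.append({
--                 "test_name": test_name,
--                 "description": description,
--                 "implementation": "Test boundary conditions (screen edges, speed limits)",
--                 "expected_behavior": "Graceful handling of all edge cases"
--             })
--         elif test_name == "cross_scene_integration":
--             recommendations.append({
--                 "test_name": test_name,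
--                 "description": description,
--                 "implementation": "Test traffic system with other game systems",
--                 "expected_behavior": "No conflicts with sound, graphics, or input systems"
--             })
--
--     return recommendations
-- ===== SOURCE B (Python) =====
-- # B: staged design -- stage 1 resolves every description eagerly (same KeyError
-- # behaviour as A), stage 2 is a recursive build that constructs the result
-- # back-to-front (tail first, then prepend the head's record if the name is known).
-- _KNOWN = {
--     "multi_car_coordination": (
--         "Create test with 5+ cars coordinating lane changes",
--         "Cars should communicate and avoid conflicts",
--     ),
--     "emergency_evasion_scenarios": (
--         "Create scenarios with sudden obstacles",
--         "95%+ success rate in avoiding collisions",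
--     ),
--     "edge_case_scenarios": (
--         "Test boundary conditions (screen edges, speed limits)",
--         "Graceful handling of all edge cases",
--     ),
--     "cross_scene_integration": (
--         "Test traffic system with other game systems",
--         "No conflicts with sound, graphics, or input systems",
--     ),
-- }
--
-- def _build(pairs):
--     if not pairs:
--         return []
--     name, description = pairs[0]
--     rest = _build(pairs[1:])
--     if name in _KNOWN:
--         implementation, expected = _KNOWN[name]
--         return [{
--             "test_name": name,
--             "description": description,
--             "implementation": implementation,
--             "expected_behavior": expected,
--         }] + rest
--     return rest
--
-- def _generate_integration_test_recommendations(missing_tests, required_tests):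
--     described = [(name, required_tests[name]) for name in missing_tests]
--     return _build(described)
-- ===== Notes on version B (the rewrite author's own statement) =====
-- stated objective: alternative
-- what changed: A's single accumulator loop with a four-branch if/elif chain is replaced by two stages: a first pass that eagerly resolves (name, description) pairs (keeping A's KeyError behaviour), then a recursive build over those pairs that constructs the output back-to-front by prepending records for known names.
import Mathlib
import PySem

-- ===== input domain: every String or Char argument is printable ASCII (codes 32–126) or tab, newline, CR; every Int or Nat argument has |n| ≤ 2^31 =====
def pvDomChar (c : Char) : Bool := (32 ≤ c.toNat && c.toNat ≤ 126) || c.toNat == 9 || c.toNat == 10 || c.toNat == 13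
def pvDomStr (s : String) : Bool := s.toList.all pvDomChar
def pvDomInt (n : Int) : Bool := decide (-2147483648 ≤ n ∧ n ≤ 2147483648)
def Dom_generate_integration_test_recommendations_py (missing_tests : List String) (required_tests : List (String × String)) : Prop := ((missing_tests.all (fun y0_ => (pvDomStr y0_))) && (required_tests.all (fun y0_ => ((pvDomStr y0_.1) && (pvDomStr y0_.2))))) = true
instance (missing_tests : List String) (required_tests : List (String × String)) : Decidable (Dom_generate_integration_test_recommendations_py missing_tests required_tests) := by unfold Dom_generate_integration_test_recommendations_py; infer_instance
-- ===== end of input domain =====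

-- B replaces A's single accumulator loop + if/elif chain by two stages: a map pass
-- resolving (name, description) pairs, then a recursive back-to-front build;
-- objective: alternative, same O(n) cost.


-- ===== PORT A =====
-- A: accumulator loop over missing_tests; eager dict lookup, then a four-branch
-- if/elif chain, each branch appending a literal dict.  Pre_ excludes the KeyError
-- case, so the lookup is ported as getD "".
def generate_integration_test_recommendations_py (missing_tests : List String) (required_tests : List (String × String)) : List (List (String × String)) :=
  missing_tests.foldl (fun recommendations test_name =>
    let description := ((PySem.Dict.mk required_tests).get? test_name).getD ""
    if test_name == "multi_car_coordination" then
      recommendations ++ [[("test_name", test_name), ("description", description),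
        ("implementation", "Create test with 5+ cars coordinating lane changes"),
        ("expected_behavior", "Cars should communicate and avoid conflicts")]]
    else if test_name == "emergency_evasion_scenarios" then
      recommendations ++ [[("test_name", test_name), ("description", description),
        ("implementation", "Create scenarios with sudden obstacles"),
        ("expected_behavior", "95%+ success rate in avoiding collisions")]]
    else if test_name == "edge_case_scenarios" then
      recommendations ++ [[("test_name", test_name), ("description", description),
        ("implementation", "Test boundary conditions (screen edges, speed limits)"),
        ("expected_behavior", "Graceful handling of all edge cases")]]
    else if test_name == "cross_scene_integration" then
      recommendations ++ [[("test_name", test_name), ("description", description),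
        ("implementation", "Test traffic system with other game systems"),
        ("expected_behavior", "No conflicts with sound, graphics, or input systems")]]
    else recommendations) []

-- ===== PORT B =====
-- B: stage-2 recursive build over already-described pairs, prepending each known
-- name's record in front of the recursively built tail.
def pvKnownTable : PySem.Dict String (String × String) :=
  PySem.Dict.mk [
    ("multi_car_coordination",
      ("Create test with 5+ cars coordinating lane changes",
       "Cars should communicate and avoid conflicts")),
    ("emergency_evasion_scenarios",
      ("Create scenarios with sudden obstacles",
       "95%+ success rate in avoiding collisions")),
    ("edge_case_scenarios",
      ("Test boundary conditions (screen edges, speed limits)",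
       "Graceful handling of all edge cases")),
    ("cross_scene_integration",
      ("Test traffic system with other game systems",
       "No conflicts with sound, graphics, or input systems"))]

def pvBuild : List (String × String) → List (List (String × String))
  | [] => []
  | (name, description) :: pairs =>
      let rest := pvBuild pairs
      match pvKnownTable.get? name with
      | some (implementation, expected) =>
          [("test_name", name), ("description", description),
           ("implementation", implementation), ("expected_behavior", expected)] :: rest
      | none => rest

def generate_integration_test_recommendations_py_alt (missing_tests : List String) (required_tests : List (String × String)) : List (List (String × String)) :=
  -- stage 1: eager description lookups (getD "" under Pre_, exactly as in port A)
  let described := missing_tests.map (fun name => (name, ((PySem.Dict.mk required_tests).get? name).getD ""))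
  pvBuild described

-- ===== PRECONDITION & SPEC =====
-- Pre_ excludes exactly the inputs where A raises KeyError: a name in missing_tests
-- absent from required_tests.
def Pre_generate_integration_test_recommendations_py (missing_tests : List String) (required_tests : List (String × String)) : Prop :=
  missing_tests.all (fun s => (PySem.Dict.mk required_tests).contains s) = true
instance (missing_tests : List String) (required_tests : List (String × String)) : Decidable (Pre_generate_integration_test_recommendations_py missing_tests required_tests) := by unfold Pre_generate_integration_test_recommendations_py; infer_instance
def pvWitness_generate_integration_test_recommendations_py : List String × (List (String × String)) :=
  (["multi_car_coordination", "other"], [("multi_car_coordination", "coord"), ("other", "misc")])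

def Spec_generate_integration_test_recommendations_py (missing_tests : List String) (required_tests : List (String × String)) (out : List (List (String × String))) : Prop := out = generate_integration_test_recommendations_py_alt missing_tests required_tests
instance (missing_tests : List String) (required_tests : List (String × String)) (out : List (List (String × String))) : Decidable (Spec_generate_integration_test_recommendations_py missing_tests required_tests out) := by unfold Spec_generate_integration_test_recommendations_py; infer_instance

-- ===== CLAIM (what is proved, stated in full; the proofs are below) =====
def Claim_equal_generate_integration_test_recommendations_py : Prop := ∀ (missing_tests : List String) (required_tests : List (String × String)), Dom_generate_integration_test_recommendations_py missing_tests required_tests → Pre_generate_integration_test_recommendations_py missing_tests required_tests → Spec_generate_integration_test_recommendations_py missing_tests required_tests (generate_integration_test_recommendations_py missing_tests required_tests)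

-- ===== LEMMAS AND PROOFS =====

-- one step of A's loop equals the accumulator followed by pvBuild of the single pair
lemma pvBody_eq (required_tests : List (String × String)) (acc : List (List (String × String))) (test_name : String) :
    (let description := ((PySem.Dict.mk required_tests).get? test_name).getD ""
     if test_name == "multi_car_coordination" then
       acc ++ [[("test_name", test_name), ("description", description),
         ("implementation", "Create test with 5+ cars coordinating lane changes"),
         ("expected_behavior", "Cars should communicate and avoid conflicts")]]
     else if test_name == "emergency_evasion_scenarios" then
       acc ++ [[("test_name", test_name), ("description", description),
         ("implementation", "Create scenarios with sudden obstacles"),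
         ("expected_behavior", "95%+ success rate in avoiding collisions")]]
     else if test_name == "edge_case_scenarios" then
       acc ++ [[("test_name", test_name), ("description", description),
         ("implementation", "Test boundary conditions (screen edges, speed limits)"),
         ("expected_behavior", "Graceful handling of all edge cases")]]
     else if test_name == "cross_scene_integration" then
       acc ++ [[("test_name", test_name), ("description", description),
         ("implementation", "Test traffic system with other game systems"),
         ("expected_behavior", "No conflicts with sound, graphics, or input systems")]]
     else acc)
    = acc ++ pvBuild [(test_name, ((PySem.Dict.mk required_tests).get? test_name).getD "")] := by
  by_cases h1 : test_name = "multi_car_coordination"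
  · subst h1; rfl
  · by_cases h2 : test_name = "emergency_evasion_scenarios"
    · subst h2; rfl
    · by_cases h3 : test_name = "edge_case_scenarios"
      · subst h3; rfl
      · by_cases h4 : test_name = "cross_scene_integration"
        · subst h4; rfl
        · simp [pvBuild, pvKnownTable, h1, h2, h3, h4,
            Ne.symm h1, Ne.symm h2, Ne.symm h3, Ne.symm h4, PySem.Dict.get?]

lemma pvFoldA_eq (required_tests : List (String × String)) :
    ∀ (l : List String) (acc : List (List (String × String))),
      List.foldl (fun recommendations test_name =>
        let description := ((PySem.Dict.mk required_tests).get? test_name).getD ""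
        if test_name == "multi_car_coordination" then
          recommendations ++ [[("test_name", test_name), ("description", description),
            ("implementation", "Create test with 5+ cars coordinating lane changes"),
            ("expected_behavior", "Cars should communicate and avoid conflicts")]]
        else if test_name == "emergency_evasion_scenarios" then
          recommendations ++ [[("test_name", test_name), ("description", description),
            ("implementation", "Create scenarios with sudden obstacles"),
            ("expected_behavior", "95%+ success rate in avoiding collisions")]]
        else if test_name == "edge_case_scenarios" then
          recommendations ++ [[("test_name", test_name), ("description", description),
            ("implementation", "Test boundary conditions (screen edges, speed limits)"),
            ("expected_behavior", "Graceful handling of all edge cases")]]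
        else if test_name == "cross_scene_integration" then
          recommendations ++ [[("test_name", test_name), ("description", description),
            ("implementation", "Test traffic system with other game systems"),
            ("expected_behavior", "No conflicts with sound, graphics, or input systems")]]
        else recommendations) acc l
      = acc ++ pvBuild (l.map (fun name => (name, ((PySem.Dict.mk required_tests).get? name).getD ""))) := by
  intro l
  induction l with
  | nil => intro acc; simp [pvBuild]
  | cons hd tl ih =>
      intro acc
      rw [List.foldl_cons, ih, pvBody_eq required_tests acc hd, List.map_cons]
      cases h : pvKnownTable.get? hd with
      | none => simp [pvBuild, h]
      | some v => cases v with
        | mk impl beh => simp [pvBuild, h]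

-- ===== VERDICT (by name: the statement is the Claim_ definition above) =====
theorem generate_integration_test_recommendations_py_spec : Claim_equal_generate_integration_test_recommendations_py := by
  intro missing_tests required_tests _ _
  show generate_integration_test_recommendations_py missing_tests required_tests
      = generate_integration_test_recommendations_py_alt missing_tests required_tests
  unfold generate_integration_test_recommendations_py
  rw [pvFoldA_eq required_tests missing_tests []]
  rfl
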